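-- pv_equiv track=rewrite | github.com/Muz-guzgu/bkaczmarczyk | matura/matura 2024 czerwiec/zad4.py | zad_4_2
-- ===== SOURCE A (Python) =====
-- def zad_4_2(wiersze):
--     lista_fragmentow = []
--     for wiersz in wiersze:
--         p = 0
--         k = 5
--         while k <= len(wiersz):
--             fragment = wiersz[p:k]
--             if fragment[0] == "e" and fragment[-1] == "e":
--                 lista_fragmentow.append(fragment)
--             p += 1
--             k += 1
--     return lista_fragmentow
-- ===== SOURCE B (Python) =====
-- def zad_4_2(wiersze):
--     lista_fragmentow = []
--     for wiersz in wiersze: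
--         s = wiersz
--         while len(s) >= 5:
--             if s[0] == "e" and s[4] == "e":
--                 lista_fragmentow.append(s[:5])
--             s = s[1:]
--     return lista_fragmentow
-- ===== Notes on version B (the rewrite author's own statement) =====
-- stated objective: alternative
-- what changed: B walks the suffixes of each line directly, testing the 1st and 5th character of the current suffix, instead of A's two-counter (p,k) index loop that slices every window and inspects its first and last character.
import Mathlib
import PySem

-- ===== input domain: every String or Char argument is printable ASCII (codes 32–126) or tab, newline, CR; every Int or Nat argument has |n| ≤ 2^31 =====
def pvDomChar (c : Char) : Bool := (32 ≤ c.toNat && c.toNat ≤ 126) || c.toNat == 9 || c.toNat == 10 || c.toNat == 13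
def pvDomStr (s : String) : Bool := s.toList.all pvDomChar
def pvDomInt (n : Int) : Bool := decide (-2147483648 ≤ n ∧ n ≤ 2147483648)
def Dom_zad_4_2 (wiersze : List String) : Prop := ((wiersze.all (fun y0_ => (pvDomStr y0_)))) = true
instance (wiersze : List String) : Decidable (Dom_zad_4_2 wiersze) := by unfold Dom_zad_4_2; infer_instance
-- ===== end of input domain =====

-- B walks the suffixes of each line directly (alternative decomposition); A runs a two-counter index loop slicing every window.

-- ===== PORT A =====
-- A's while loop: p counts up, k = p + 5; each window wiersz[p:k] is sliced and its
-- first and last characters tested (fragment[0], fragment[-1] via pyGet?).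
def zad4Loop (cs : List Char) (p : Nat) (acc : List String) : List String :=
  if h : p + 5 ≤ cs.length then
    let fragment := PySem.List.slice cs (some (p : Int)) (some ((p : Int) + 5))
    let acc' := if PySem.List.pyGet? fragment 0 = some 'e' ∧
                   PySem.List.pyGet? fragment (-1) = some 'e'
                then acc ++ [String.ofList fragment] else acc
    zad4Loop cs (p + 1) acc'
  else acc
  termination_by cs.length - p
  decreasing_by omega

def zad_4_2 (wiersze : List String) : List String :=
  wiersze.foldl (fun acc w => zad4Loop w.toList 0 acc) []

-- ===== PORT B =====
-- B's while loop: shrink the suffix by one character each step; test s[0] and s[4], append s[:5].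
def zad4Scan (s : List Char) (acc : List String) : List String :=
  match s with
  | c0 :: c1 :: c2 :: c3 :: c4 :: rest =>
      zad4Scan (c1 :: c2 :: c3 :: c4 :: rest)
        (if c0 = 'e' ∧ c4 = 'e' then acc ++ [String.ofList [c0, c1, c2, c3, c4]] else acc)
  | _ => acc

def zad_4_2_alt (wiersze : List String) : List String :=
  wiersze.foldl (fun acc w => zad4Scan w.toList acc) []

-- ===== PRECONDITION & SPEC =====
def Spec_zad_4_2 (wiersze : List String) (out : List String) : Prop := out = zad_4_2_alt wiersze
instance (wiersze : List String) (out : List String) : Decidable (Spec_zad_4_2 wiersze out) := by unfold Spec_zad_4_2; infer_instance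

-- ===== CLAIM (what is proved, stated in full; the proofs are below) =====
def Claim_equal_zad_4_2 : Prop := ∀ (wiersze : List String), Dom_zad_4_2 wiersze → Spec_zad_4_2 wiersze (zad_4_2 wiersze)

-- ===== LEMMAS AND PROOFS =====

-- B's scan returns the accumulator unchanged on a suffix shorter than five characters.
theorem zad4Scan_short (s : List Char) (acc : List String) (h : s.length < 5) :
    zad4Scan s acc = acc := by
  rcases s with _ | ⟨a, _ | ⟨b, _ | ⟨c, _ | ⟨d, _ | ⟨e, t⟩⟩⟩⟩⟩ <;>
    first
      | rfl
      | (simp only [List.length_cons] at h; omega)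

-- A's loop at position p is B's scan of the p-th suffix.
theorem zad4Loop_eq_scan (cs : List Char) (p : Nat) (acc : List String) :
    zad4Loop cs p acc = zad4Scan (cs.drop p) acc := by
  have key : ∀ (n p : Nat) (acc : List String), cs.length - p ≤ n →
      zad4Loop cs p acc = zad4Scan (cs.drop p) acc := by
    intro n
    induction n with
    | zero =>
      intro p acc hle
      rw [zad4Loop]
      have hnot : ¬ p + 5 ≤ cs.length := by omega
      have hnil : cs.drop p = [] := by
        apply List.drop_eq_nil_of_le; omega
      simp only [hnot, dif_neg, not_false_iff, hnil, zad4Scan]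
    | succ n ih =>
      intro p acc hle
      rw [zad4Loop]
      by_cases h : p + 5 ≤ cs.length
      · simp only [h, dif_pos]
        rw [ih (p + 1) _ (by omega)]
        -- decompose the suffix at p into its first five characters
        have hlen : 5 ≤ (cs.drop p).length := by simp; omega
        rcases hd : cs.drop p with _ | ⟨c0, _ | ⟨c1, _ | ⟨c2, _ | ⟨c3, _ | ⟨c4, t⟩⟩⟩⟩⟩ <;>
          rw [hd] at hlen <;> simp only [List.length_cons, List.length_nil] at hlen <;>
          try omega
        have hdrop1 : cs.drop (p + 1) = c1 :: c2 :: c3 :: c4 :: t := by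
          have ht : (cs.drop p).tail = cs.drop (p + 1) := List.tail_drop
          rw [hd] at ht
          simpa using ht.symm
        rw [hdrop1, zad4Scan]
        congr 1
        -- the sliced fragment is exactly the first five characters of the suffix
        have hfrag : PySem.List.slice cs (some (p : Int)) (some ((p : Int) + 5))
            = [c0, c1, c2, c3, c4] := by
          have hc : ((p : Int) + 5) = ((p + 5 : Nat) : Int) := by push_cast; ring
          rw [hc, PySem.List.slice_natCast, hd]
          simp
        rw [hfrag]
        simp [PySem.List.pyGet?_neg_one, List.getLast?]
      · simp only [h, dif_neg, not_false_iff]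
        rw [zad4Scan_short]
        simp; omega
  exact key (cs.length - p) p acc le_rfl

-- ===== VERDICT (by name: the statement is the Claim_ definition above) =====
theorem zad_4_2_spec : Claim_equal_zad_4_2 := by
  intro wiersze _
  show zad_4_2 wiersze = zad_4_2_alt wiersze
  unfold zad_4_2 zad_4_2_alt
  congr 1
  funext acc w
  simpa using zad4Loop_eq_scan w.toList 0 acc
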